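-- pv_equiv track=rewrite | github.com/primary-sources-dev/primary-sources | tools/convert_workbench_feedback_v2.py | map_doc_type_to_class
-- ===== SOURCE A (Python) =====
-- def map_doc_type_to_class(doc_type: str) -> str:
--     value = str(doc_type or "").strip().upper()
--     if not value:
--         return "OTHER"
--     if "AFFIDAVIT" in value:
--         return "AFFIDAVIT"
--     if "DEPOSITION" in value:
--         return "DEPOSITION"
--     if "TESTIMONY" in value:
--         return "TESTIMONY"
--     if "EXHIBIT" in value:
--         return "EXHIBIT"
--     if any(t in value for t in ("TRAVEL", "PASSPORT", "VISA")):
--         return "TRAVEL"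
--     if any(t in value for t in ("CABLE", "TELETYPE", "AIRTEL")):
--         return "CABLE"
--     if "MEMO" in value:
--         return "MEMO"
--     if "LETTER" in value or "CORRESPONDENCE" in value:
--         return "CORRESPONDENCE"
--     if any(t in value for t in ("REPORT", "302", "STATEMENT", "RIF")):
--         return "REPORT"
--     return "OTHER"
-- ===== SOURCE B (Python) =====
-- KEYWORDS = [
--     ("AFFIDAVIT", 0), ("DEPOSITION", 1), ("TESTIMONY", 2), ("EXHIBIT", 3),
--     ("TRAVEL", 4), ("PASSPORT", 4), ("VISA", 4),
--     ("CABLE", 5), ("TELETYPE", 5), ("AIRTEL", 5),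
--     ("MEMO", 6),
--     ("LETTER", 7), ("CORRESPONDENCE", 7),
--     ("REPORT", 8), ("302", 8), ("STATEMENT", 8), ("RIF", 8),
-- ]
-- CLASSES = ["AFFIDAVIT", "DEPOSITION", "TESTIMONY", "EXHIBIT", "TRAVEL",
--            "CABLE", "MEMO", "CORRESPONDENCE", "REPORT", "OTHER"]
--
-- def map_doc_type_to_class(doc_type: str) -> str:
--     value = str(doc_type or "").strip().upper()
--     if not value:
--         return "OTHER"
--     best = 9
--     for i in range(len(value)):
--         for kw, prio in KEYWORDS:
--             if prio < best and value.startswith(kw, i):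
--                 best = prio
--     return CLASSES[best]
-- ===== Notes on version B (the rewrite author's own statement) =====
-- stated objective: alternative
-- what changed: Replaces the ordered chain of per-category substring-containment tests with a single left-to-right scan over the text positions that matches all keywords from a table at each position and keeps the best (lowest) priority seen, returning the class of that priority.
import Mathlib
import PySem

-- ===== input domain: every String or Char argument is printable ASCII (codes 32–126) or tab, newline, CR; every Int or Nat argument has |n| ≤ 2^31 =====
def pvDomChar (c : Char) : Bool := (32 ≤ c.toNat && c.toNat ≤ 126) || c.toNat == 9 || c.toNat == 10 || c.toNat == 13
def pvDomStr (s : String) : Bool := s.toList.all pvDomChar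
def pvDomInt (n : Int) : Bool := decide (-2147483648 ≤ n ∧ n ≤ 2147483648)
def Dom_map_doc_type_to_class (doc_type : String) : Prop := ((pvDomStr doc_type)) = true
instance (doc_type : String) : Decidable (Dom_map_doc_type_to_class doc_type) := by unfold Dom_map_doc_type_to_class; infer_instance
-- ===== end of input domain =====

-- B replaces A's ordered chain of substring-containment tests by a single left-to-right scan of the
-- text that keeps a best-(lowest)-priority accumulator over a keyword/priority table (objective: alternative).


-- ===== PORT A =====
def map_doc_type_to_class (doc_type : String) : String :=
  let value := PySem.Str.upper (PySem.Str.strip doc_type)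
  if value = "" then "OTHER"
  else if PySem.Str.isIn "AFFIDAVIT" value then "AFFIDAVIT"
  else if PySem.Str.isIn "DEPOSITION" value then "DEPOSITION"
  else if PySem.Str.isIn "TESTIMONY" value then "TESTIMONY"
  else if PySem.Str.isIn "EXHIBIT" value then "EXHIBIT"
  else if ["TRAVEL", "PASSPORT", "VISA"].any (fun t => PySem.Str.isIn t value) then "TRAVEL"
  else if ["CABLE", "TELETYPE", "AIRTEL"].any (fun t => PySem.Str.isIn t value) then "CABLE"
  else if PySem.Str.isIn "MEMO" value then "MEMO"
  else if PySem.Str.isIn "LETTER" value || PySem.Str.isIn "CORRESPONDENCE" value then "CORRESPONDENCE"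
  else if ["REPORT", "302", "STATEMENT", "RIF"].any (fun t => PySem.Str.isIn t value) then "REPORT"
  else "OTHER"

-- ===== PORT B =====
def pvKeywords : List (List Char × Nat) :=
  [("AFFIDAVIT".toList, 0), ("DEPOSITION".toList, 1), ("TESTIMONY".toList, 2), ("EXHIBIT".toList, 3),
   ("TRAVEL".toList, 4), ("PASSPORT".toList, 4), ("VISA".toList, 4),
   ("CABLE".toList, 5), ("TELETYPE".toList, 5), ("AIRTEL".toList, 5),
   ("MEMO".toList, 6),
   ("LETTER".toList, 7), ("CORRESPONDENCE".toList, 7),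
   ("REPORT".toList, 8), ("302".toList, 8), ("STATEMENT".toList, 8), ("RIF".toList, 8)]

def pvClasses : List String :=
  ["AFFIDAVIT", "DEPOSITION", "TESTIMONY", "EXHIBIT", "TRAVEL",
   "CABLE", "MEMO", "CORRESPONDENCE", "REPORT", "OTHER"]

-- inner loop of Source B: try every keyword at the current position, keep the best priority
def pvScanStep (cs : List Char) (best : Nat) : Nat :=
  pvKeywords.foldl (fun b kp => if kp.2 < b ∧ List.isPrefixOf kp.1 cs then kp.2 else b) best

-- outer loop of Source B: one pass over the positions (suffixes) of the text
def pvScan : List Char → Nat → Nat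
  | [], best => best
  | c :: rest, best => pvScan rest (pvScanStep (c :: rest) best)

def map_doc_type_to_class_alt (doc_type : String) : String :=
  let value := PySem.Str.upper (PySem.Str.strip doc_type)
  if value = "" then "OTHER"
  else pvClasses.getD (pvScan value.toList 9) "OTHER"

-- ===== PRECONDITION & SPEC =====
def Spec_map_doc_type_to_class (doc_type : String) (out : String) : Prop := out = map_doc_type_to_class_alt doc_type
instance (doc_type : String) (out : String) : Decidable (Spec_map_doc_type_to_class doc_type out) := by unfold Spec_map_doc_type_to_class; infer_instance

-- ===== CLAIM =====
def Claim_equal_map_doc_type_to_class : Prop := ∀ (doc_type : String), Dom_map_doc_type_to_class doc_type → Spec_map_doc_type_to_class doc_type (map_doc_type_to_class doc_type)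

-- ===== LEMMAS AND PROOFS =====

lemma pvFoldl_le (cs : List Char) (rules : List (List Char × Nat)) (b : Nat) :
    rules.foldl (fun b kp => if kp.2 < b ∧ List.isPrefixOf kp.1 cs then kp.2 else b) b ≤ b := by
  induction rules generalizing b with
  | nil => simp
  | cons kp rest ih =>
    simp only [List.foldl_cons]
    refine le_trans (ih _) ?_
    split_ifs with h
    · omega
    · exact le_refl _

lemma pvFoldl_le_of_mem (cs : List Char) (rules : List (List Char × Nat)) (b : Nat)
    (kp : List Char × Nat) (hm : kp ∈ rules) (hp : List.isPrefixOf kp.1 cs) :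
    rules.foldl (fun b kp => if kp.2 < b ∧ List.isPrefixOf kp.1 cs then kp.2 else b) b ≤ kp.2 := by
  induction rules generalizing b with
  | nil => simp at hm
  | cons hd rest ih =>
    simp only [List.foldl_cons]
    rcases List.mem_cons.mp hm with rfl | hm'
    · refine le_trans (pvFoldl_le cs rest _) ?_
      split_ifs with h
      · omega
      · simp only [not_and] at h
        by_cases hlt : kp.2 < b
        · exact absurd hp (by simpa using h hlt)
        · omega
    · exact ih _ hm'

lemma pvFoldl_cases (cs : List Char) (rules : List (List Char × Nat)) (b : Nat) :
    rules.foldl (fun b kp => if kp.2 < b ∧ List.isPrefixOf kp.1 cs then kp.2 else b) b = b ∨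
    ∃ kp ∈ rules, List.isPrefixOf kp.1 cs = true ∧
      rules.foldl (fun b kp => if kp.2 < b ∧ List.isPrefixOf kp.1 cs then kp.2 else b) b = kp.2 := by
  induction rules generalizing b with
  | nil => simp
  | cons hd rest ih =>
    simp only [List.foldl_cons]
    rcases ih (if hd.2 < b ∧ List.isPrefixOf hd.1 cs then hd.2 else b) with h | ⟨kp, hm, hp, he⟩
    · rw [h]
      split_ifs with hc
      · exact Or.inr ⟨hd, List.mem_cons_self .., hc.2, rfl⟩
      · exact Or.inl rfl
    · exact Or.inr ⟨kp, List.mem_cons_of_mem _ hm, hp, he⟩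

lemma pvScan_le (cs : List Char) (b : Nat) : pvScan cs b ≤ b := by
  induction cs generalizing b with
  | nil => simp [pvScan]
  | cons c rest ih =>
    exact le_trans (ih _) (pvFoldl_le _ _ _)

lemma pvScan_le_of_mem (cs : List Char) (b : Nat) (kp : List Char × Nat)
    (hm : kp ∈ pvKeywords) (hne : kp.1 ≠ []) : kp.1 <:+: cs → pvScan cs b ≤ kp.2 := by
  induction cs generalizing b with
  | nil => intro hi; exact absurd (List.infix_nil.mp hi) hne
  | cons c rest ih =>
    intro hi
    rcases List.infix_cons_iff.mp hi with hpre | hinf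
    · refine le_trans (pvScan_le rest _) ?_
      exact pvFoldl_le_of_mem _ _ _ kp hm (List.isPrefixOf_iff_prefix.mpr hpre)
    · exact ih _ hinf

lemma pvStep_cases (cs : List Char) (b : Nat) :
    pvScanStep cs b = b ∨ ∃ kp ∈ pvKeywords, List.isPrefixOf kp.1 cs = true ∧ pvScanStep cs b = kp.2 :=
  pvFoldl_cases cs pvKeywords b

lemma pvScan_cases (cs : List Char) (b : Nat) :
    pvScan cs b = b ∨ ∃ kp ∈ pvKeywords, kp.1 <:+: cs ∧ pvScan cs b = kp.2 := by
  induction cs generalizing b with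
  | nil => exact Or.inl rfl
  | cons c rest ih =>
    rcases ih (pvScanStep (c :: rest) b) with h | ⟨kp, hm, hi, he⟩
    · rcases pvStep_cases (c :: rest) b with h' | ⟨kp, hm, hp, he⟩
      · exact Or.inl ((h.trans h' : pvScan (c :: rest) b = b))
      · exact Or.inr ⟨kp, hm, (List.isPrefixOf_iff_prefix.mp hp).isInfix, (h.trans he : pvScan (c :: rest) b = kp.2)⟩
    · exact Or.inr ⟨kp, hm, List.infix_cons_iff.mpr (Or.inr hi), (he : pvScan (c :: rest) b = kp.2)⟩

lemma pvScan_ge (cs : List Char) (q : Nat) (hq : q ≤ 9)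
    (h : ∀ kp ∈ pvKeywords, kp.1 <:+: cs → q ≤ kp.2) : q ≤ pvScan cs 9 := by
  rcases pvScan_cases cs 9 with he | ⟨kp, hm, hi, he⟩
  · omega
  · rw [he]; exact h kp hm hi

-- ===== VERDICT =====
set_option maxHeartbeats 2000000 in
theorem map_doc_type_to_class_spec : Claim_equal_map_doc_type_to_class := by
  intro doc_type _
  unfold Spec_map_doc_type_to_class map_doc_type_to_class map_doc_type_to_class_alt
  generalize PySem.Str.upper (PySem.Str.strip doc_type) = v
  by_cases h0 : v = ""
  · simp [h0]
  simp only [if_neg h0]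
  by_cases h1 : "AFFIDAVIT".toList <:+: v.toList
  · rw [if_pos (by simpa [PySem.Str.isIn_eq, PySem.Chars.isIn_iff_infix] using h1)]
    have hub := pvScan_le_of_mem v.toList 9 ("AFFIDAVIT".toList, 0) (by simp [pvKeywords]) (by decide) h1
    have hlb : (0:Nat) ≤ pvScan v.toList 9 := Nat.zero_le _
    rw [show pvScan v.toList 9 = 0 by omega]; rfl
  rw [if_neg (by simpa [PySem.Str.isIn_eq, PySem.Chars.isIn_iff_infix] using h1)]
  by_cases h2 : "DEPOSITION".toList <:+: v.toList
  · rw [if_pos (by simpa [PySem.Str.isIn_eq, PySem.Chars.isIn_iff_infix] using h2)]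
    have hub := pvScan_le_of_mem v.toList 9 ("DEPOSITION".toList, 1) (by simp [pvKeywords]) (by decide) h2
    have hlb := pvScan_ge v.toList 1 (by omega) (by
      intro kp hm hi; fin_cases hm <;> simp_all)
    rw [show pvScan v.toList 9 = 1 by omega]; rfl
  rw [if_neg (by simpa [PySem.Str.isIn_eq, PySem.Chars.isIn_iff_infix] using h2)]
  by_cases h3 : "TESTIMONY".toList <:+: v.toList
  · rw [if_pos (by simpa [PySem.Str.isIn_eq, PySem.Chars.isIn_iff_infix] using h3)]
    have hub := pvScan_le_of_mem v.toList 9 ("TESTIMONY".toList, 2) (by simp [pvKeywords]) (by decide) h3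
    have hlb := pvScan_ge v.toList 2 (by omega) (by
      intro kp hm hi; fin_cases hm <;> simp_all)
    rw [show pvScan v.toList 9 = 2 by omega]; rfl
  rw [if_neg (by simpa [PySem.Str.isIn_eq, PySem.Chars.isIn_iff_infix] using h3)]
  by_cases h4 : "EXHIBIT".toList <:+: v.toList
  · rw [if_pos (by simpa [PySem.Str.isIn_eq, PySem.Chars.isIn_iff_infix] using h4)]
    have hub := pvScan_le_of_mem v.toList 9 ("EXHIBIT".toList, 3) (by simp [pvKeywords]) (by decide) h4
    have hlb := pvScan_ge v.toList 3 (by omega) (by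
      intro kp hm hi; fin_cases hm <;> simp_all)
    rw [show pvScan v.toList 9 = 3 by omega]; rfl
  rw [if_neg (by simpa [PySem.Str.isIn_eq, PySem.Chars.isIn_iff_infix] using h4)]
  by_cases h5 : "TRAVEL".toList <:+: v.toList ∨ "PASSPORT".toList <:+: v.toList ∨ "VISA".toList <:+: v.toList
  · rw [if_pos (by simpa [PySem.Str.isIn_eq, PySem.Chars.isIn_iff_infix] using h5)]
    have hub : pvScan v.toList 9 ≤ 4 := by
      rcases h5 with h | h | h
      · exact pvScan_le_of_mem v.toList 9 ("TRAVEL".toList, 4) (by simp [pvKeywords]) (by decide) h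
      · exact pvScan_le_of_mem v.toList 9 ("PASSPORT".toList, 4) (by simp [pvKeywords]) (by decide) h
      · exact pvScan_le_of_mem v.toList 9 ("VISA".toList, 4) (by simp [pvKeywords]) (by decide) h
    have hlb := pvScan_ge v.toList 4 (by omega) (by
      intro kp hm hi; fin_cases hm <;> simp_all)
    rw [show pvScan v.toList 9 = 4 by omega]; rfl
  rw [if_neg (by simpa [PySem.Str.isIn_eq, PySem.Chars.isIn_iff_infix] using h5)]
  by_cases h6 : "CABLE".toList <:+: v.toList ∨ "TELETYPE".toList <:+: v.toList ∨ "AIRTEL".toList <:+: v.toList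
  · rw [if_pos (by simpa [PySem.Str.isIn_eq, PySem.Chars.isIn_iff_infix] using h6)]
    have hub : pvScan v.toList 9 ≤ 5 := by
      rcases h6 with h | h | h
      · exact pvScan_le_of_mem v.toList 9 ("CABLE".toList, 5) (by simp [pvKeywords]) (by decide) h
      · exact pvScan_le_of_mem v.toList 9 ("TELETYPE".toList, 5) (by simp [pvKeywords]) (by decide) h
      · exact pvScan_le_of_mem v.toList 9 ("AIRTEL".toList, 5) (by simp [pvKeywords]) (by decide) h
    have hlb := pvScan_ge v.toList 5 (by omega) (by
      intro kp hm hi; fin_cases hm <;> simp_all)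
    rw [show pvScan v.toList 9 = 5 by omega]; rfl
  rw [if_neg (by simpa [PySem.Str.isIn_eq, PySem.Chars.isIn_iff_infix] using h6)]
  by_cases h7 : "MEMO".toList <:+: v.toList
  · rw [if_pos (by simpa [PySem.Str.isIn_eq, PySem.Chars.isIn_iff_infix] using h7)]
    have hub := pvScan_le_of_mem v.toList 9 ("MEMO".toList, 6) (by simp [pvKeywords]) (by decide) h7
    have hlb := pvScan_ge v.toList 6 (by omega) (by
      intro kp hm hi; fin_cases hm <;> simp_all)
    rw [show pvScan v.toList 9 = 6 by omega]; rfl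
  rw [if_neg (by simpa [PySem.Str.isIn_eq, PySem.Chars.isIn_iff_infix] using h7)]
  by_cases h8 : "LETTER".toList <:+: v.toList ∨ "CORRESPONDENCE".toList <:+: v.toList
  · rw [if_pos (by simpa [PySem.Str.isIn_eq, PySem.Chars.isIn_iff_infix] using h8)]
    have hub : pvScan v.toList 9 ≤ 7 := by
      rcases h8 with h | h
      · exact pvScan_le_of_mem v.toList 9 ("LETTER".toList, 7) (by simp [pvKeywords]) (by decide) h
      · exact pvScan_le_of_mem v.toList 9 ("CORRESPONDENCE".toList, 7) (by simp [pvKeywords]) (by decide) h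
    have hlb := pvScan_ge v.toList 7 (by omega) (by
      intro kp hm hi; fin_cases hm <;> simp_all)
    rw [show pvScan v.toList 9 = 7 by omega]; rfl
  rw [if_neg (by simpa [PySem.Str.isIn_eq, PySem.Chars.isIn_iff_infix] using h8)]
  by_cases h9 : "REPORT".toList <:+: v.toList ∨ "302".toList <:+: v.toList ∨ "STATEMENT".toList <:+: v.toList ∨ "RIF".toList <:+: v.toList
  · rw [if_pos (by simpa [PySem.Str.isIn_eq, PySem.Chars.isIn_iff_infix] using h9)]
    have hub : pvScan v.toList 9 ≤ 8 := by
      rcases h9 with h | h | h | h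
      · exact pvScan_le_of_mem v.toList 9 ("REPORT".toList, 8) (by simp [pvKeywords]) (by decide) h
      · exact pvScan_le_of_mem v.toList 9 ("302".toList, 8) (by simp [pvKeywords]) (by decide) h
      · exact pvScan_le_of_mem v.toList 9 ("STATEMENT".toList, 8) (by simp [pvKeywords]) (by decide) h
      · exact pvScan_le_of_mem v.toList 9 ("RIF".toList, 8) (by simp [pvKeywords]) (by decide) h
    have hlb := pvScan_ge v.toList 8 (by omega) (by
      intro kp hm hi; fin_cases hm <;> simp_all)
    rw [show pvScan v.toList 9 = 8 by omega]; rfl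
  rw [if_neg (by simpa [PySem.Str.isIn_eq, PySem.Chars.isIn_iff_infix] using h9)]
  have hlb := pvScan_ge v.toList 9 (by omega) (by
    intro kp hm hi; fin_cases hm <;> simp_all)
  have hub := pvScan_le v.toList 9
  rw [show pvScan v.toList 9 = 9 by omega]; rfl
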